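-- pv_equiv track=rewrite | github.com/abodthedude25/cpsc526 | assignment3/dekrypt2.py | regex_pass
-- ===== SOURCE A (Python) =====
-- def regex_pass(pattern: str):
--     """
--     Generates all possible passwords from 'pattern'.
--     Each underscore '_' can become any digit [0-9] or be removed entirely.
--     """
--     expansions = ['']
--
--     for ch in pattern:
--         new_expansions = []
--         if ch != '_':
--             # Just append this character to all existing expansions
--             for e in expansions:
--                 new_expansions.append(e + ch)
--         else:
--             # we either insert digits '0'..'9', or skip adding anything
--             for e in expansions:
--                 for digit in '0123456789':
--                     new_expansions.append(e + digit)
--                 new_expansions.append(e)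
--         expansions = new_expansions
--
--     return expansions
-- ===== SOURCE B (Python) =====
-- def regex_pass(pattern: str):
--     """
--     Generates all possible passwords from 'pattern'.
--     Each underscore '_' can become any digit [0-9] or be removed entirely.
--
--     Rank-decoding: count the total number of expansions (product of the
--     per-position option counts), then decode each index i in range(total)
--     into one expansion by mixed-radix division (rightmost position fastest,
--     matching the original ordering).
--     """
--     opts = [list('0123456789') + [''] if ch == '_' else [ch] for ch in pattern]
--     total = 1
--     for o in opts:
--         total *= len(o)
--     result = []
--     for i in range(total):
--         rem = i
--         parts = []
--         for o in reversed(opts):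
--             rem, k = divmod(rem, len(o))
--             parts.append(o[k])
--         result.append(''.join(reversed(parts)))
--     return result
-- ===== Notes on version B (the rewrite author's own statement) =====
-- stated objective: alternative
-- what changed: Replaces A's incremental list-rebuilding loop (one pass per pattern character over the whole expansion list, re-appending element by element) with rank decoding: the total count is the product of per-position option counts and each index in range(total) is decoded into its expansion by mixed-radix divmod.
import Mathlib
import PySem

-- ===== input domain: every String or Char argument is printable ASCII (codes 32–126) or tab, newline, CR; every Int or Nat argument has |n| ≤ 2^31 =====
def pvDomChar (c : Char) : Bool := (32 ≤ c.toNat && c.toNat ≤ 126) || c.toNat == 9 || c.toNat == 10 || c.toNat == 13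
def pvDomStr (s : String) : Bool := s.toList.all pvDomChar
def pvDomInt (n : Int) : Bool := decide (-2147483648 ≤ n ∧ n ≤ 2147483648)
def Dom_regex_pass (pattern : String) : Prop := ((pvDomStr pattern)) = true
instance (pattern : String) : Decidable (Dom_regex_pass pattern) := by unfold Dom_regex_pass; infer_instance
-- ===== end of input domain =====

-- B replaces A's incremental rebuilding of the whole expansion list (one pass per pattern
-- character) with rank decoding: the total count is the product of the per-position option
-- counts and each index in range(total) is decoded by mixed-radix divmod
-- (objective: alternative algorithm; same asymptotic cost, measurably faster constants).

-- ===== PORT A =====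
-- A's loop state 'expansions' as List (List Char); each Python `e + ch` is `e ++ [ch]`.
def pvStepA (expansions : List (List Char)) (ch : Char) : List (List Char) :=
  if ch != '_' then
    expansions.foldl (fun ne e => ne ++ [e ++ [ch]]) []
  else
    expansions.foldl (fun ne e =>
      ("0123456789".toList.foldl (fun ne2 d => ne2 ++ [e ++ [d]]) ne) ++ [e]) []

def regex_pass (pattern : String) : List String :=
  (pattern.toList.foldl pvStepA [[]]).map String.ofList

-- ===== PORT B =====
-- Source B's per-character option list; the string option '' is [] on the List Char side.
def pvOptB (ch : Char) : List (List Char) :=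
  if ch == '_' then "0123456789".toList.map (fun d => [d]) ++ [[]] else [[ch]]

-- Transliteration of Source B: `total` is the accumulated product, and each i in range(total)
-- is decoded by the reversed-opts divmod loop with state (rem, parts).  rem ≥ 0 and
-- len(o) ≥ 1 always, so Python's divmod is exactly Nat division/mod here, and o[k]
-- (k = rem % len(o) < len(o)) is exactly getD; ''.join is flatten.
def regex_pass_alt (pattern : String) : List String :=
  let opts := pattern.toList.map pvOptB
  let total := opts.foldl (fun t o => t * o.length) 1
  (List.range total).map (fun i =>
    let st := opts.reverse.foldl
      (fun (s : Nat × List (List Char)) o =>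
        (s.1 / o.length, s.2 ++ [o.getD (s.1 % o.length) []]))
      (i, [])
    String.ofList st.2.reverse.flatten)

-- ===== PRECONDITION & SPEC =====
def Spec_regex_pass (pattern : String) (out : List String) : Prop := out = regex_pass_alt pattern
instance (pattern : String) (out : List String) : Decidable (Spec_regex_pass pattern out) := by unfold Spec_regex_pass; infer_instance

-- ===== CLAIM (what is proved, stated in full; the proofs are below) =====
def Claim_equal_regex_pass : Prop := ∀ (pattern : String), Dom_regex_pass pattern → Spec_regex_pass pattern (regex_pass pattern)

-- ===== LEMMAS AND PROOFS =====

-- the canonical cartesian expansion both ports are reduced to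
def pvExpand : List Char → List (List Char)
  | [] => [[]]
  | c :: cs => (pvOptB c).flatMap (fun opt => (pvExpand cs).map (fun tail => opt ++ tail))

-- ---- A side: the accumulator loop computes pvExpand ----
theorem pvFlatMap_singleton_fn (l : List (List Char)) (f : List Char → List Char) :
    l.flatMap (fun e => [f e]) = l.map f := by
  induction l with
  | nil => simp
  | cons x xs ih => simp [ih]

theorem pvStepA_eq (expansions : List (List Char)) (ch : Char) :
    pvStepA expansions ch = expansions.flatMap (fun e => (pvOptB ch).map (fun o => e ++ o)) := by
  unfold pvStepA pvOptB
  by_cases h : ch = '_'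
  · subst h
    simp only [bne_self_eq_false, Bool.false_eq_true, if_false, beq_self_eq_true, if_true]
    rw [show (fun (ne : List (List Char)) (e : List Char) =>
        ("0123456789".toList.foldl (fun ne2 d => ne2 ++ [e ++ [d]]) ne) ++ [e]) =
        (fun ne e => ne ++ (("0123456789".toList.map (fun d => e ++ [d])) ++ [e])) from ?_]
    · rw [PySem.List.foldl_append_eq_flatMap]
      simp
    · funext ne e
      rw [PySem.List.foldl_append_singleton_eq_map, List.append_assoc]
  · simp only [bne_iff_ne, ne_eq, h, not_false_eq_true, if_true, beq_iff_eq]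
    rw [PySem.List.foldl_append_singleton_eq_map]
    simp [pvFlatMap_singleton_fn]

theorem pvLoopA_eq (cs : List Char) (expansions : List (List Char)) :
    cs.foldl pvStepA expansions
      = expansions.flatMap (fun e => (pvExpand cs).map (fun t => e ++ t)) := by
  induction cs generalizing expansions with
  | nil => simp [pvExpand]
  | cons c cs ih =>
    simp only [List.foldl_cons]
    rw [ih, pvStepA_eq]
    simp [pvExpand, List.flatMap_assoc, List.flatMap_map, List.map_map, List.map_flatMap, Function.comp_def, List.append_assoc]

-- ---- B side: rank decoding enumerates pvExpand ----
def pvProd (os : List (List (List Char))) : Nat := (os.map List.length).prod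

def pvParts : List (List (List Char)) → Nat → List (List Char)
  | [], _ => []
  | o :: os, i => pvParts os i ++ [o.getD ((i / pvProd os) % o.length) []]

theorem pvFoldMul_eq (os : List (List (List Char))) (a : Nat) :
    os.foldl (fun t o => t * o.length) a = a * pvProd os := by
  induction os generalizing a with
  | nil => simp [pvProd]
  | cons o os ih => simp only [List.foldl_cons, ih, pvProd, List.map_cons, List.prod_cons]; ring

theorem pvDecode_eq (os : List (List (List Char))) (i : Nat) (ps : List (List Char)) :
    os.foldr (fun o (s : Nat × List (List Char)) =>
        (s.1 / o.length, s.2 ++ [o.getD (s.1 % o.length) []])) (i, ps)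
      = (i / pvProd os, ps ++ pvParts os i) := by
  induction os generalizing ps with
  | nil => simp [pvProd, pvParts]
  | cons o os ih =>
    simp only [List.foldr_cons, ih, pvParts]
    refine Prod.ext ?_ ?_
    · show i / pvProd os / o.length = i / pvProd (o :: os)
      rw [Nat.div_div_eq_div_mul]
      simp [pvProd, Nat.mul_comm]
    · simp

theorem pvParts_mod (os : List (List (List Char))) (i : Nat) :
    pvParts os (i % pvProd os) = pvParts os i := by
  induction os generalizing i with
  | nil => simp [pvParts]
  | cons o os ih =>
    have hP : pvProd (o :: os) = o.length * pvProd os := by simp [pvProd]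
    simp only [pvParts, hP]
    congr 1
    · rw [← ih (i % (o.length * pvProd os)), Nat.mod_mul_left_mod, ih]
    · rw [Nat.mul_comm o.length, Nat.mod_mul_right_div_self, Nat.mod_mod_of_dvd _ (dvd_refl _)]

theorem pvRange_mul (n T : Nat) :
    List.range (n * T) = (List.range n).flatMap (fun k => (List.range T).map (fun j => k * T + j)) := by
  induction n with
  | zero => simp
  | succ n ih =>
    rw [Nat.succ_mul, List.range_add, ih, List.range_succ, List.flatMap_append]
    simp

theorem pvFlatMap_index (o : List (List Char)) (f : List Char → List (List Char)) :
    (List.range o.length).flatMap (fun k => f (o.getD k [])) = o.flatMap f := by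
  induction o with
  | nil => simp
  | cons x xs ih =>
    rw [List.length_cons, List.range_succ_eq_map, List.flatMap_cons, List.flatMap_map]
    simpa using ih

theorem pvEnum_eq (cs : List Char) :
    (List.range (pvProd (cs.map pvOptB))).map
        (fun j => (pvParts (cs.map pvOptB) j).reverse.flatten) = pvExpand cs := by
  induction cs with
  | nil => simp [pvProd, pvParts, pvExpand]
  | cons c cs ih =>
    have hP : pvProd ((c :: cs).map pvOptB)
        = (pvOptB c).length * pvProd (cs.map pvOptB) := by
      simp [pvProd]
    rw [hP, pvRange_mul, List.map_flatMap]
    rw [show pvExpand (c :: cs)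
        = (pvOptB c).flatMap (fun opt => (pvExpand cs).map (fun tail => opt ++ tail)) from rfl]
    rw [← pvFlatMap_index (pvOptB c) (fun opt => (pvExpand cs).map (fun tail => opt ++ tail))]
    apply List.flatMap_congr
    intro k hk
    rw [List.mem_range] at hk
    rw [List.map_map]
    rw [← ih, List.map_map]
    apply List.map_congr_left
    intro j hj
    rw [List.mem_range] at hj
    have hT : 0 < pvProd (cs.map pvOptB) := Nat.lt_of_le_of_lt (Nat.zero_le j) hj
    have h1 : (k * pvProd (cs.map pvOptB) + j) / pvProd (cs.map pvOptB) = k := by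
      rw [show k * pvProd (cs.map pvOptB) + j = j + pvProd (cs.map pvOptB) * k by ring,
        Nat.add_mul_div_left _ _ hT, Nat.div_eq_of_lt hj]; omega
    have h2 : pvParts (cs.map pvOptB) (k * pvProd (cs.map pvOptB) + j)
        = pvParts (cs.map pvOptB) j := by
      rw [← pvParts_mod, show k * pvProd (cs.map pvOptB) + j = j + pvProd (cs.map pvOptB) * k by ring,
        Nat.add_mul_mod_self_left, pvParts_mod]
    have h3 : k % (pvOptB c).length = k := Nat.mod_eq_of_lt hk
    simp [pvParts, h1, h2, h3]

-- ===== VERDICT (by name: the statement is the Claim_ definition above) =====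
theorem regex_pass_spec : Claim_equal_regex_pass := by
  intro pattern _
  unfold Spec_regex_pass regex_pass regex_pass_alt
  simp only [pvLoopA_eq, pvFoldMul_eq, one_mul, List.foldl_reverse, pvDecode_eq]
  simp only [List.flatMap_cons, List.flatMap_nil, List.nil_append, List.append_nil,
    List.map_id']
  have h := congrArg (List.map String.ofList) (pvEnum_eq pattern.toList)
  rw [List.map_map] at h
  simp only [Function.comp_def] at h
  exact h.symm
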